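-- pv_equiv track=rewrite | github.com/ffancer/study_with_codewars_part2 | 7 kyu Simple equation reversal.py | solve
-- ===== SOURCE A (Python) =====
-- def solve(eq):
--     lst = []
--     s1 = ''
--     s2 = ''
--
--     for i in eq:
--         if i.isalnum():
--             s1 += i
--         elif i in '*+-/':
--             s2 = i
--             lst.append(s1)
--             lst.append(s2)
--             s1 = ''
--             s2 = ''
--     lst.append(s1)
--
--     return ''.join(lst[::-1])
-- ===== SOURCE B (Python) =====
-- import re
--
-- def solve(eq):
--     filtered = ''.join(c for c in eq if c.isalnum() or c in '*+-/')
--     tokens = re.findall(r'[*+\-/]|[^*+\-/]+', filtered)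
--     return ''.join(reversed(tokens))
-- ===== Notes on version B (the rewrite author's own statement) =====
-- stated objective: idiomatic
-- what changed: A's char-by-char accumulator state machine (pending run s1, emit on each operator) is replaced by filter-kept-chars, regex tokenization into operator/run tokens, then reverse-and-join.
import Mathlib
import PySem

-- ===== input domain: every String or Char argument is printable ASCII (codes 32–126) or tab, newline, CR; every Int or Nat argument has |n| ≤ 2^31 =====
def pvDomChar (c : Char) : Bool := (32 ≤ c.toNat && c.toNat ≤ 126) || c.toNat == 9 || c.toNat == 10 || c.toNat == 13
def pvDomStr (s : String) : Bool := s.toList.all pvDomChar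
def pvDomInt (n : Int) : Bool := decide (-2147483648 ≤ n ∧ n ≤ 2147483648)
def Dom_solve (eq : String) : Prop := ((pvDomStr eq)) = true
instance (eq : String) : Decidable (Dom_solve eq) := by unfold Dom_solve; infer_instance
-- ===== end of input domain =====

-- B replaces A's char-by-char accumulator state machine by filter-then-tokenize-then-reverse (regex in Python); objective: simpler/idiomatic, same cost.

-- ===== PORT A =====
-- state = (lst, s1, s2); one step of A's for-loop body, branches in A's order
def solveStep (st : List (List Char) × List Char × List Char) (c : Char) :
    List (List Char) × List Char × List Char :=
  let lst := st.1
  let s1 := st.2.1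
  let s2 := st.2.2
  if PySem.Chars.isalnum c then (lst, s1 ++ [c], s2)
  else if ['*','+','-','/'].contains c then
    let s2' := [c]
    (lst ++ [s1, s2'], [], [])
  else (lst, s1, s2)

def solve (eq : String) : String :=
  let r := eq.toList.foldl solveStep ([], [], [])
  let lst := r.1 ++ [r.2.1]            -- lst.append(s1)
  String.ofList (lst.reverse).flatten      -- ''.join(lst[::-1]) : join with '' = flatten

-- ===== PORT B =====
def isOpB (c : Char) : Bool := ['*','+','-','/'].contains c

-- re.findall(r'[*+\-/]|[^*+\-/]+', s): an operator is its own token, a maximal non-operator run is one token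
def tokenizeB : List Char → List (List Char)
  | [] => []
  | c :: cs =>
    if isOpB c then [c] :: tokenizeB cs
    else (c :: cs.takeWhile (fun d => !isOpB d)) :: tokenizeB (cs.dropWhile (fun d => !isOpB d))
termination_by l => l.length
decreasing_by
  · simp
  · exact Nat.lt_succ_of_le (List.length_dropWhile_le _ _)

def solve_alt (eq : String) : String :=
  let filtered := eq.toList.filter (fun c => PySem.Chars.isalnum c || isOpB c)
  String.ofList ((tokenizeB filtered).reverse).flatten   -- ''.join(reversed(tokens))

-- ===== PRECONDITION & SPEC =====
def Spec_solve (eq : String) (out : String) : Prop := out = solve_alt eq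
instance (eq : String) (out : String) : Decidable (Spec_solve eq out) := by unfold Spec_solve; infer_instance

-- ===== CLAIM (what is proved, stated in full; the proofs are below) =====
def Claim_equal_solve : Prop := ∀ (eq : String), Dom_solve eq → Spec_solve eq (solve eq)

-- ===== LEMMAS AND PROOFS =====

theorem contains_eq_isOpB (c : Char) : (['*','+','-','/'].contains c) = isOpB c := rfl

-- token stream A's loop produces from pending run s1 and remaining input l
def tokA (s1 : List Char) : List Char → List (List Char)
  | [] => [s1]
  | c :: cs =>
    if PySem.Chars.isalnum c then tokA (s1 ++ [c]) cs
    else if ['*','+','-','/'].contains c then s1 :: [c] :: tokA [] cs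
    else tokA s1 cs

theorem foldl_solveStep_eq_tokA (l : List Char) (lst : List (List Char)) (s1 s2 : List Char) :
    (l.foldl solveStep (lst, s1, s2)).1 ++ [(l.foldl solveStep (lst, s1, s2)).2.1]
      = lst ++ tokA s1 l := by
  induction l generalizing lst s1 s2 with
  | nil => simp [tokA]
  | cons c cs ih =>
    simp only [List.foldl_cons, solveStep, tokA]
    split_ifs with h1 h2 <;> simp [ih]

theorem tokA_filter (l : List Char) (s1 : List Char) :
    tokA s1 (l.filter (fun c => PySem.Chars.isalnum c || isOpB c)) = tokA s1 l := by
  induction l generalizing s1 with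
  | nil => rfl
  | cons c cs ih =>
    by_cases h1 : PySem.Chars.isalnum c
    · simp [List.filter_cons, h1, tokA, ih]
    · by_cases h2 : isOpB c
      · simp [List.filter_cons, h1, h2, tokA, contains_eq_isOpB, ih]
      · have h2' : ¬(c = '*' ∨ c = '+' ∨ c = '-' ∨ c = '/') := by simpa [isOpB] using h2
        simp [List.filter_cons, h1, h2, tokA, h2', ih]

theorem takeWhile_append_of_all {p : Char → Bool} (s r : List Char) (h : ∀ c ∈ s, p c) :
    (s ++ r).takeWhile p = s ++ r.takeWhile p := by
  induction s with
  | nil => rfl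
  | cons c cs ih =>
    simp only [List.cons_append, List.takeWhile_cons, h c (by simp)]
    simp [ih fun d hd => h d (by simp [hd])]

theorem dropWhile_append_of_all {p : Char → Bool} (s r : List Char) (h : ∀ c ∈ s, p c) :
    (s ++ r).dropWhile p = r.dropWhile p := by
  induction s with
  | nil => rfl
  | cons c cs ih =>
    simp only [List.cons_append, List.dropWhile_cons, h c (by simp)]
    simp [ih fun d hd => h d (by simp [hd])]

theorem op_not_alnum (c : Char) (h : isOpB c = true) : PySem.Chars.isalnum c = false := by
  simp [isOpB] at h
  rcases h with h | h | h | h <;> subst h <;> decide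

theorem op_not_alnum' (c : Char) (h : PySem.Chars.isalnum c = true) : isOpB c = false := by
  cases hb : isOpB c
  · rfl
  · exact absurd h (by simp [op_not_alnum c hb])

-- a nonempty non-operator run followed by [] or an operator is one leading token
theorem tokenizeB_prepend (s1 rest : List Char) (hs : ∀ c ∈ s1, isOpB c = false)
    (hne : s1 ≠ []) (hr : rest = [] ∨ ∃ c cs, rest = c :: cs ∧ isOpB c = true) :
    tokenizeB (s1 ++ rest) = s1 :: tokenizeB rest := by
  cases s1 with
  | nil => exact absurd rfl hne
  | cons d s1' =>
    have hd : isOpB d = false := hs d (by simp)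
    have hall : ∀ c ∈ s1', (fun d => !isOpB d) c = true := by
      intro c hc; simp [hs c (by simp [hc])]
    have htw : (s1' ++ rest).takeWhile (fun d => !isOpB d) = s1' := by
      rw [takeWhile_append_of_all _ _ hall]
      rcases hr with h | ⟨c, cs, h, hop⟩
      · simp [h]
      · simp [h, List.takeWhile_cons, hop]
    have hdw : (s1' ++ rest).dropWhile (fun d => !isOpB d) = rest := by
      rw [dropWhile_append_of_all _ _ hall]
      rcases hr with h | ⟨c, cs, h, hop⟩
      · simp [h]
      · simp [h, List.dropWhile_cons, hop]
    simp only [List.cons_append, tokenizeB, hd, Bool.false_eq_true, if_false, htw, hdw]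

theorem tokA_eq_tokenizeB (n : ℕ) (l : List Char) (hn : l.length ≤ n)
    (hl : ∀ c ∈ l, PySem.Chars.isalnum c || isOpB c)
    (s1 : List Char) (hs : ∀ c ∈ s1, PySem.Chars.isalnum c) :
    ((tokA s1 l).reverse).flatten = ((tokenizeB (s1 ++ l)).reverse).flatten := by
  induction n generalizing l s1 with
  | zero =>
    have : l = [] := List.eq_nil_of_length_eq_zero (Nat.le_zero.mp hn)
    subst this
    by_cases h : s1 = []
    · subst h; simp [tokA, tokenizeB]
    · have hp := tokenizeB_prepend s1 [] (fun c hc => op_not_alnum' c (hs c hc)) h (Or.inl rfl)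
      simp only [List.append_nil] at hp ⊢
      rw [hp]; simp [tokA, tokenizeB]
  | succ n ih =>
    cases l with
    | nil =>
      by_cases h : s1 = []
      · subst h; simp [tokA, tokenizeB]
      · have hp := tokenizeB_prepend s1 [] (fun c hc => op_not_alnum' c (hs c hc)) h (Or.inl rfl)
        simp only [List.append_nil] at hp ⊢
        rw [hp]; simp [tokA, tokenizeB]
    | cons c cs =>
      have hn' : cs.length ≤ n := by simpa using Nat.lt_succ_iff.mp (by simpa using hn)
      have hl' : ∀ d ∈ cs, PySem.Chars.isalnum d || isOpB d := fun d hd => hl d (by simp [hd])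
      by_cases h1 : PySem.Chars.isalnum c
      · have hs' : ∀ d ∈ s1 ++ [c], PySem.Chars.isalnum d = true := by
          intro d hd
          rcases List.mem_append.mp hd with h' | h'
          · exact hs d h'
          · simp at h'; subst h'; exact h1
        have := ih cs hn' hl' (s1 ++ [c]) hs'
        simpa [tokA, h1, List.append_assoc] using this
      · have h2 : isOpB c = true := by have := hl c (by simp); simpa [h1] using this
        have ihc := ih cs hn' hl' [] (by simp)
        simp only [List.nil_append] at ihc
        have htok : tokenizeB (s1 ++ c :: cs) = if s1 = [] then [c] :: tokenizeB cs else s1 :: [c] :: tokenizeB cs := by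
          by_cases h : s1 = []
          · simp [h, tokenizeB, h2]
          · rw [tokenizeB_prepend s1 (c :: cs) (fun d hd => op_not_alnum' d (hs d hd)) h (Or.inr ⟨c, cs, rfl, h2⟩)]
            simp [h, tokenizeB, h2]
        have h2' : c = '*' ∨ c = '+' ∨ c = '-' ∨ c = '/' := by simpa [isOpB] using h2
        by_cases h : s1 = []
        · subst h; simp at htok; simp [tokA, h1, h2', htok, ihc]
        · simp [tokA, h1, h2', htok, h, ihc]

-- ===== VERDICT (by name: the statement is the Claim_ definition above) =====
theorem solve_spec : Claim_equal_solve := by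
  intro eq _
  unfold Spec_solve solve solve_alt
  simp only
  rw [foldl_solveStep_eq_tokA, List.nil_append]
  rw [← tokA_filter eq.toList []]
  rw [tokA_eq_tokenizeB (eq.toList.filter (fun c => PySem.Chars.isalnum c || isOpB c)).length _ le_rfl
    (fun c hc => (List.mem_filter.mp hc).2) [] (by simp)]
  simp
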